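-- pv_equiv track=rewrite | github.com/SSH1007/Algorithm | 프로그래머스/0/181893. 배열 조각하기/배열 조각하기.py | solution
-- ===== SOURCE A (Python) =====
-- def solution(arr, query):
--     for i in range(len(query)):
--         if i%2:
--             arr = arr[query[i]:]
--         else:
--             arr = arr[:query[i]+1]
--     answer = arr
--     return answer
-- ===== SOURCE B (Python) =====
-- def solution(arr, query):
--     # Track a lo/hi window over the original list and slice once at the end.
--     lo, hi = 0, len(arr)
--     for i, q in enumerate(query):
--         n = hi - lo
--         if i % 2:
--             lo += (0 if n + q < 0 else n + q) if q < 0 else min(q, n)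
--         else:
--             b = q + 1
--             hi = lo + ((0 if n + b < 0 else n + b) if b < 0 else min(b, n))
--     return arr[lo:hi]
-- ===== Notes on version B (the rewrite author's own statement) =====
-- stated objective: alternative
-- what changed: Instead of materialising a new list slice on every query, B only tracks lo/hi window indices (doing Python's slice-clamping arithmetic on the indices) and slices the original array once at the end.
import Mathlib
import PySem

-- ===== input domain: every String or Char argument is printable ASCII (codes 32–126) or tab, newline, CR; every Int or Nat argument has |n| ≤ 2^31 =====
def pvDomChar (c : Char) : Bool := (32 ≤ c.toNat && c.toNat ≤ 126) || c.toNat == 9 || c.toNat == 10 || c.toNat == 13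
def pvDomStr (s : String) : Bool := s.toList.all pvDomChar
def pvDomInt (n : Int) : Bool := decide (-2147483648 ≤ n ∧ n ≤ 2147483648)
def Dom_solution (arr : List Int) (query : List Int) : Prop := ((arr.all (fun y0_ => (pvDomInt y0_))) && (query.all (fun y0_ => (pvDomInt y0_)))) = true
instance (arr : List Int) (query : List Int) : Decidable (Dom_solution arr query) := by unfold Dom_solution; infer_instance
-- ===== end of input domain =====

-- B tracks a lo/hi window over the original list and slices once at the end, instead of materialising a new slice per query (objective: alternative).

-- ===== PORT A =====
def solution (arr : List Int) (query : List Int) : List Int :=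
  let arr :=
    (PySem.List.pyRange 0 (query.length : Int) 1).foldl
      (fun a i =>
        if PySem.Int.mod i 2 ≠ 0 then
          PySem.List.slice a (some (PySem.List.pyGetD query i 0)) none
        else
          PySem.List.slice a none (some (PySem.List.pyGetD query i 0 + 1)))
      arr
  let answer := arr
  answer

-- ===== PORT B =====
-- Source B's hand-written clamp '(0 if n+x < 0 else n+x) if x < 0 else min(x, n)' is exactly
-- PySem.List.clampIdx n x; the fold carries (lo, hi) just as Source B does.
def solution_alt (arr : List Int) (query : List Int) : List Int :=
  let p :=
    (PySem.List.enumerate query).foldl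
      (fun (s : Nat × Nat) iq =>
        let n := s.2 - s.1
        if PySem.Int.mod iq.1 2 ≠ 0 then
          (s.1 + PySem.List.clampIdx n iq.2, s.2)
        else
          (s.1, s.1 + PySem.List.clampIdx n (iq.2 + 1)))
      (0, arr.length)
  PySem.List.slice arr (some (p.1 : Int)) (some (p.2 : Int))

-- ===== PRECONDITION & SPEC =====
def Spec_solution (arr : List Int) (query : List Int) (out : List Int) : Prop := out = solution_alt arr query
instance (arr : List Int) (query : List Int) (out : List Int) : Decidable (Spec_solution arr query out) := by unfold Spec_solution; infer_instance

-- ===== CLAIM (what is proved, stated in full; the proofs are below) =====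
def Claim_equal_solution : Prop := ∀ (arr : List Int) (query : List Int), Dom_solution arr query → Spec_solution arr query (solution arr query)

-- ===== LEMMAS AND PROOFS =====

-- A's index loop 'for i in range(len(query)): … query[i] …' as a fold over enumerate query.
theorem foldl_pyRange_idx_eq_enumerate {α β : Type} (f : β → Int → α → β) (d : α) :
    ∀ (xs pre : List α) (init : β),
      (PySem.List.pyRange (pre.length : Int) ((pre.length : Int) + (xs.length : Int)) 1).foldl
          (fun acc i => f acc i (PySem.List.pyGetD (pre ++ xs) i d)) init
        = (PySem.List.enumerate xs (pre.length : Int)).foldl (fun acc p => f acc p.1 p.2) init := by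
  intro xs
  induction xs with
  | nil => intro pre init; simp [PySem.List.pyRange_one_eq_nil, PySem.List.enumerate]
  | cons x rest ih =>
    intro pre init
    rw [PySem.List.pyRange_one_cons (by push_cast [List.length_cons]; omega), PySem.List.enumerate_cons]
    simp only [List.foldl_cons]
    have hget : PySem.List.pyGetD (pre ++ x :: rest) (pre.length : Int) d = x := by
      rw [PySem.List.pyGetD_natCast]
      simp [List.getD]
    rw [hget]
    have h2 := ih (pre ++ [x]) (f init (pre.length : Int) x)
    have hpp : pre ++ x :: rest = (pre ++ [x]) ++ rest := by simp
    rw [hpp]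
    simp only [List.length_append, List.length_cons, List.length_nil] at h2 ⊢
    push_cast at h2 ⊢
    rw [show (pre.length : Int) + ((rest.length : Int) + 1) = (pre.length : Int) + 1 + (rest.length : Int) by ring]
    exact h2

-- slice with a stop bound only takes the clamped prefix.
theorem slice_none_some' {α : Type} (xs : List α) (b : Int) :
    PySem.List.slice xs none (some b) = xs.take (PySem.List.clampIdx xs.length b) := by
  simp [PySem.List.slice]

-- The joint loop invariant: A's current list is the (lo, hi) window of the original.
theorem loop_invariant (arr : List Int) :
    ∀ (qs : List Int) (s : Int) (lo hi : Nat), lo ≤ hi → hi ≤ arr.length →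
      (PySem.List.enumerate qs s).foldl
          (fun a p =>
            if PySem.Int.mod p.1 2 ≠ 0 then
              PySem.List.slice a (some p.2) none
            else
              PySem.List.slice a none (some (p.2 + 1)))
          ((arr.drop lo).take (hi - lo))
        = (let q :=
            (PySem.List.enumerate qs s).foldl
              (fun (st : Nat × Nat) iq =>
                let n := st.2 - st.1
                if PySem.Int.mod iq.1 2 ≠ 0 then
                  (st.1 + PySem.List.clampIdx n iq.2, st.2)
                else
                  (st.1, st.1 + PySem.List.clampIdx n (iq.2 + 1)))
              (lo, hi)
           (arr.drop q.1).take (q.2 - q.1)) := by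
  intro qs
  induction qs with
  | nil => intro s lo hi _ _; rw [PySem.List.enumerate_nil]; rfl
  | cons q rest ih =>
    intro s lo hi hlh hha
    rw [PySem.List.enumerate_cons]
    simp only [List.foldl_cons]
    have hwlen : ((arr.drop lo).take (hi - lo)).length = hi - lo := by
      simp [List.length_take, List.length_drop]; omega
    by_cases hpar : PySem.Int.mod s 2 ≠ 0
    · simp only [if_pos hpar]
      set c := PySem.List.clampIdx (hi - lo) q with hc
      have hcle : c ≤ hi - lo := by
        have := PySem.List.clampIdx_le (hi - lo) q
        omega
      have hstep : PySem.List.slice ((arr.drop lo).take (hi - lo)) (some q) none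
          = (arr.drop (lo + c)).take (hi - (lo + c)) := by
        rw [PySem.List.slice_some_none, hwlen, ← hc]
        rw [List.drop_take, List.drop_drop]
        congr 1
        omega
      rw [hstep]
      exact ih (s + 1) (lo + c) hi (by omega) hha
    · simp only [if_neg hpar]
      set c := PySem.List.clampIdx (hi - lo) (q + 1) with hc
      have hcle : c ≤ hi - lo := by
        have := PySem.List.clampIdx_le (hi - lo) (q + 1)
        omega
      have hstep : PySem.List.slice ((arr.drop lo).take (hi - lo)) none (some (q + 1))
          = (arr.drop lo).take ((lo + c) - lo) := by
        rw [slice_none_some', hwlen, ← hc, List.take_take]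
        congr 1
        omega
      rw [hstep]
      exact ih (s + 1) lo (lo + c) (by omega) (by omega)

-- ===== VERDICT (by name: the statement is the Claim_ definition above) =====
theorem solution_spec : Claim_equal_solution := by
  intro arr query _
  unfold Spec_solution solution solution_alt
  have hbridge := foldl_pyRange_idx_eq_enumerate
    (f := fun (a : List Int) (i : Int) (q : Int) =>
      if PySem.Int.mod i 2 ≠ 0 then
        PySem.List.slice a (some q) none
      else
        PySem.List.slice a none (some (q + 1)))
    (d := (0 : Int)) query [] arr
  simp only [List.length_nil, List.nil_append, Nat.cast_zero, zero_add] at hbridge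
  rw [hbridge]
  have hinv := loop_invariant arr query 0 0 arr.length (by omega) (le_refl _)
  simp only [List.drop_zero, Nat.sub_zero, List.take_length] at hinv
  rw [hinv]
  rw [PySem.List.slice_natCast]
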